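-- pv_equiv track=rewrite | github.com/phycochow/palpant-labsite | clustering_test.py | balance_small_groups
-- ===== SOURCE A (Python) =====
-- GROUP_SIZE = 3
--
-- def balance_small_groups(groups):
--     """Merge groups smaller than GROUP_SIZE with larger groups"""
--     large_groups = [g for g in groups if len(g) >= GROUP_SIZE]
--     small_groups = [g for g in groups if len(g) < GROUP_SIZE]
--
--     # Merge small groups with large ones
--     for small_group in small_groups:
--         if large_groups:
--             # Add to smallest large group
--             smallest = min(large_groups, key=len)
--             smallest.extend(small_group)
--         else:
--             # If no large groups, keep small group as is
--             large_groups.append(small_group)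
--
--     return large_groups
-- ===== SOURCE B (Python) =====
-- GROUP_SIZE = 3
--
-- def _merge(h1, h2):
--     """Skew-heap merge; a heap is None or a tuple (length, index, left, right)."""
--     if h1 is None:
--         return h2
--     if h2 is None:
--         return h1
--     if (h1[0], h1[1]) <= (h2[0], h2[1]):
--         l, i, a, b = h1
--         return (l, i, _merge(b, h2), a)
--     l, i, a, b = h2
--     return (l, i, _merge(b, h1), a)
--
-- def balance_small_groups(groups):
--     """Merge groups smaller than GROUP_SIZE with larger groups.
--
--     Uses a skew heap keyed by (length, index) to pick the smallest large
--     group, instead of a linear scan per small group.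
--     """
--     large = [g for g in groups if len(g) >= GROUP_SIZE]
--     small = [g for g in groups if len(g) < GROUP_SIZE]
--     if not large:
--         if not small:
--             return []
--         large = [small[0]]
--         small = small[1:]
--     heap = None
--     for i, g in enumerate(large):
--         heap = _merge(heap, (len(g), i, None, None))
--     for s in small:
--         l, i, a, b = heap
--         large[i].extend(s)
--         heap = _merge(_merge(a, b), (l + len(s), i, None, None))
--     return large
-- ===== Notes on version B (the rewrite author's own statement) =====
-- stated objective: alternative
-- what changed: Selects the smallest large group with a skew heap keyed by (length, index), maintained across merges, instead of A's per-small-group linear min() scan over the large groups.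
import Mathlib
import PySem

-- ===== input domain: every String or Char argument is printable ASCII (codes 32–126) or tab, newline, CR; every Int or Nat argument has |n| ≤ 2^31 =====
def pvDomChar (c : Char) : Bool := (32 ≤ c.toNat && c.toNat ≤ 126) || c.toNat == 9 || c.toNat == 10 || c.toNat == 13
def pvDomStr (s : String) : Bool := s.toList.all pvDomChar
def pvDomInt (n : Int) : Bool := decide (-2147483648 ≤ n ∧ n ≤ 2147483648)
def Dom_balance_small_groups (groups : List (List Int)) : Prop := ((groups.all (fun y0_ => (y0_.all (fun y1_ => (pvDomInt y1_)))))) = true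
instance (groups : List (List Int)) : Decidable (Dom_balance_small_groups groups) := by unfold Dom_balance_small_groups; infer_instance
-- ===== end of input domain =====

-- B replaces A's per-small-group linear min() scan with a skew heap keyed (length, index).
-- Both Pythons extend the input's sub-lists in place; the equivalence proved here is about the return value.

-- ===== PORT A =====
-- `min(large_groups, key=len)` returns the FIRST element of minimal length; since Python then
-- mutates that object in place, the port tracks its index: pvArgmin is exactly min's scan
-- (the running best is replaced only on a strictly smaller key).
def pvArgmin : List (List Int) → Nat → Int × Nat → Int × Nat
  | [], _, best => best
  | g :: t, i, best =>
      pvArgmin t (i + 1) (if (g.length : Int) < best.1 then ((g.length : Int), i) else best)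

def balance_small_groups (groups : List (List Int)) : List (List Int) :=
  let large := groups.filter (fun g => decide (3 ≤ (g.length : Int)))
  let small := groups.filter (fun g => decide ((g.length : Int) < 3))
  small.foldl (fun lg s =>
    match lg with
    | [] => [s]
    | g :: t =>
        let j := (pvArgmin t 1 ((g.length : Int), 0)).2
        lg.set j (lg.getD j [] ++ s)) large

-- ===== PORT B =====
-- a skew heap of (length, index) keys, as in Source B's `_merge` on (l, i, left, right) tuples / None
inductive PvHeap where
  | nil : PvHeap
  | node : Int → Int → PvHeap → PvHeap → PvHeap
deriving DecidableEq, Repr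

def PvHeap.size : PvHeap → Nat
  | .nil => 0
  | .node _ _ a b => a.size + b.size + 1

-- Source B's `_merge`; the fuel argument (always ≥ the total size, see pvMerge) only makes the
-- same recursion structural, so the kernel can reduce it — it never changes the result
def pvMergeFuel : Nat → PvHeap → PvHeap → PvHeap
  | _, .nil, h2 => h2
  | _, h1, .nil => h1
  | 0, h1, _ => h1
  | n + 1, .node l1 i1 a1 b1, .node l2 i2 a2 b2 =>
      if l1 < l2 ∨ (l1 = l2 ∧ i1 ≤ i2) then
        .node l1 i1 (pvMergeFuel n b1 (.node l2 i2 a2 b2)) a1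
      else
        .node l2 i2 (pvMergeFuel n b2 (.node l1 i1 a1 b1)) a2

def pvMerge (h1 h2 : PvHeap) : PvHeap := pvMergeFuel (h1.size + h2.size) h1 h2

def balance_small_groups_alt (groups : List (List Int)) : List (List Int) :=
  let large := groups.filter (fun g => decide (3 ≤ (g.length : Int)))
  let small := groups.filter (fun g => decide ((g.length : Int) < 3))
  let p : List (List Int) × List (List Int) :=
    if large.isEmpty then
      match small with
      | [] => ([], [])
      | s :: rest => ([s], rest)
    else (large, small)
  let heap := p.1.zipIdx.foldl
    (fun h gi => pvMerge h (.node (gi.1.length : Int) (gi.2 : Int) .nil .nil)) .nil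
  (p.2.foldl (fun st s =>
      match st.2 with
      | .nil => st  -- unreachable: the heap is nonempty whenever the processed list is
      | .node l i a b =>
          (st.1.set i.toNat (st.1.getD i.toNat [] ++ s),
           pvMerge (pvMerge a b) (.node (l + (s.length : Int)) i .nil .nil)))
    (p.1, heap)).1

-- ===== PRECONDITION & SPEC =====
def Spec_balance_small_groups (groups : List (List Int)) (out : List (List Int)) : Prop := out = balance_small_groups_alt groups
instance (groups : List (List Int)) (out : List (List Int)) : Decidable (Spec_balance_small_groups groups out) := by unfold Spec_balance_small_groups; infer_instance

-- ===== CLAIM (what is proved, stated in full; the proofs are below) =====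
def Claim_equal_balance_small_groups : Prop := ∀ (groups : List (List Int)), Dom_balance_small_groups groups → Spec_balance_small_groups groups (balance_small_groups groups)

-- ===== LEMMAS AND PROOFS =====

-- Python's lexicographic ≤ on the (length, index) tuples Source B compares
def pvLexLe (p q : Int × Int) : Prop := p.1 < q.1 ∨ (p.1 = q.1 ∧ p.2 ≤ q.2)

def PvHeap.keys : PvHeap → Multiset (Int × Int)
  | .nil => 0
  | .node l i a b => (l, i) ::ₘ (a.keys + b.keys)

def PvHeap.Ordered : PvHeap → Prop
  | .nil => True
  | .node l i a b => (∀ k ∈ a.keys + b.keys, pvLexLe (l, i) k) ∧ a.Ordered ∧ b.Ordered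

-- the (length, index) key list of the current list of groups
def pvKL (lg : List (List Int)) : List (Int × Int) :=
  lg.zipIdx.map (fun p => ((p.1.length : Int), (p.2 : Int)))

lemma pvMergeFuel_keys : ∀ (n : Nat) (h1 h2 : PvHeap), h1.size + h2.size ≤ n →
    (pvMergeFuel n h1 h2).keys = h1.keys + h2.keys := by
  intro n
  induction n with
  | zero =>
      intro h1 h2 hle
      cases h1 with
      | nil => simp [pvMergeFuel, PvHeap.keys]
      | node l1 i1 a1 b1 =>
        cases h2 with
        | nil => simp [pvMergeFuel, PvHeap.keys]
        | node l2 i2 a2 b2 => simp [PvHeap.size] at hle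
  | succ n ih =>
      intro h1 h2 hle
      cases h1 with
      | nil => simp [pvMergeFuel, PvHeap.keys]
      | node l1 i1 a1 b1 =>
        cases h2 with
        | nil => simp [pvMergeFuel, PvHeap.keys]
        | node l2 i2 a2 b2 =>
          simp only [pvMergeFuel]
          split_ifs with hc
          · rw [show (PvHeap.node l1 i1 (pvMergeFuel n b1 (.node l2 i2 a2 b2)) a1).keys
                = (l1, i1) ::ₘ ((pvMergeFuel n b1 (.node l2 i2 a2 b2)).keys + a1.keys) from rfl,
                ih b1 (.node l2 i2 a2 b2) (by simp [PvHeap.size] at hle ⊢; omega)]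
            simp [PvHeap.keys, Multiset.cons_swap, add_comm, add_assoc]
          · rw [show (PvHeap.node l2 i2 (pvMergeFuel n b2 (.node l1 i1 a1 b1)) a2).keys
                = (l2, i2) ::ₘ ((pvMergeFuel n b2 (.node l1 i1 a1 b1)).keys + a2.keys) from rfl,
                ih b2 (.node l1 i1 a1 b1) (by simp [PvHeap.size] at hle ⊢; omega)]
            simp [PvHeap.keys, Multiset.cons_swap, add_comm, add_left_comm, add_assoc]

lemma pvMergeFuel_ordered : ∀ (n : Nat) (h1 h2 : PvHeap), h1.size + h2.size ≤ n →
    h1.Ordered → h2.Ordered → (pvMergeFuel n h1 h2).Ordered := by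
  intro n
  induction n with
  | zero =>
      intro h1 h2 hle o1 o2
      cases h1 with
      | nil => simpa [pvMergeFuel]
      | node l1 i1 a1 b1 =>
        cases h2 with
        | nil => simpa [pvMergeFuel]
        | node l2 i2 a2 b2 => simp [PvHeap.size] at hle
  | succ n ih =>
      intro h1 h2 hle o1 o2
      cases h1 with
      | nil => simpa [pvMergeFuel]
      | node l1 i1 a1 b1 =>
        cases h2 with
        | nil => simpa [pvMergeFuel]
        | node l2 i2 a2 b2 =>
          have hfb1 : b1.size + (PvHeap.node l2 i2 a2 b2).size ≤ n := by
            simp [PvHeap.size] at hle ⊢; omega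
          have hfb2 : b2.size + (PvHeap.node l1 i1 a1 b1).size ≤ n := by
            simp [PvHeap.size] at hle ⊢; omega
          simp only [pvMergeFuel]
          split_ifs with hc
          · simp only [PvHeap.Ordered] at o1 ⊢
            obtain ⟨hk1, oa1, ob1⟩ := o1
            refine ⟨?_, ih b1 _ hfb1 ob1 o2, oa1⟩
            intro k hk
            rw [pvMergeFuel_keys n _ _ hfb1] at hk
            simp only [Multiset.mem_add] at hk
            rcases hk with (hk | hk) | hk
            · exact hk1 k (Multiset.mem_add.mpr (Or.inr hk))
            · simp only [PvHeap.Ordered] at o2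
              rcases o2 with ⟨hk2, -, -⟩
              simp only [PvHeap.keys, Multiset.mem_cons] at hk
              rcases hk with rfl | hk
              · unfold pvLexLe; omega
              · have := hk2 k hk
                unfold pvLexLe at *; omega
            · exact hk1 k (Multiset.mem_add.mpr (Or.inl hk))
          · simp only [PvHeap.Ordered] at o2 ⊢
            obtain ⟨hk2, oa2, ob2⟩ := o2
            refine ⟨?_, ih b2 _ hfb2 ob2 o1, oa2⟩
            intro k hk
            rw [pvMergeFuel_keys n _ _ hfb2] at hk
            simp only [Multiset.mem_add] at hk
            rcases hk with (hk | hk) | hk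
            · exact hk2 k (Multiset.mem_add.mpr (Or.inr hk))
            · simp only [PvHeap.Ordered] at o1
              rcases o1 with ⟨hk1, -, -⟩
              simp only [PvHeap.keys, Multiset.mem_cons] at hk
              rcases hk with rfl | hk
              · unfold pvLexLe at *; omega
              · have := hk1 k hk
                unfold pvLexLe at *; omega
            · exact hk2 k (Multiset.mem_add.mpr (Or.inl hk))

lemma pvMerge_keys (h1 h2 : PvHeap) : (pvMerge h1 h2).keys = h1.keys + h2.keys :=
  pvMergeFuel_keys _ h1 h2 le_rfl

lemma pvMerge_ordered {h1 h2 : PvHeap} (o1 : h1.Ordered) (o2 : h2.Ordered) :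
    (pvMerge h1 h2).Ordered :=
  pvMergeFuel_ordered _ h1 h2 le_rfl o1 o2

lemma pvArgmin_go (t : List (List Int)) (i0 : Nat) (bl : Int) (bi : Nat) :
    (pvArgmin t i0 (bl, bi) = (bl, bi) ∧ ∀ j (hj : j < t.length), bl ≤ (t[j].length : Int))
    ∨ (∃ j, ∃ hj : j < t.length, pvArgmin t i0 (bl, bi) = ((t[j].length : Int), i0 + j)
        ∧ (t[j].length : Int) < bl
        ∧ (∀ k (hk : k < t.length), (t[j].length : Int) ≤ (t[k].length : Int))
        ∧ (∀ k (hk : k < t.length), k < j → (t[j].length : Int) < (t[k].length : Int))) := by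
  induction t generalizing i0 bl bi with
  | nil => left; constructor; · rfl
           · intro j hj; simp at hj
  | cons g t ih =>
      by_cases hg : (g.length : Int) < bl
      · rw [show pvArgmin (g :: t) i0 (bl, bi) = pvArgmin t (i0 + 1) ((g.length : Int), i0) by
          simp [pvArgmin, if_pos hg]]
        rcases ih (i0 + 1) (g.length : Int) i0 with ⟨heq, hall⟩ | ⟨j, hj, heq, hlt, hall, hfirst⟩
        · right
          refine ⟨0, by simp, ?_, hg, ?_, ?_⟩
          · simpa using heq
          · intro k hk
            cases k with
            | zero => simp
            | succ k => simpa using hall k (by simpa using hk)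
          · intro k hk hk0; omega
        · right
          refine ⟨j + 1, by simpa using hj, ?_, ?_, ?_, ?_⟩
          · simpa [Nat.add_assoc, Nat.add_comm 1 j] using heq
          · simp only [List.getElem_cons_succ]; omega
          · intro k hk
            cases k with
            | zero => simp only [List.getElem_cons_succ, List.getElem_cons_zero]; omega
            | succ k => simpa using hall k (by simpa using hk)
          · intro k hk hkj
            cases k with
            | zero => simp only [List.getElem_cons_succ, List.getElem_cons_zero]; omega
            | succ k => simpa using hfirst k (by simpa using hk) (by omega)
      · rw [show pvArgmin (g :: t) i0 (bl, bi) = pvArgmin t (i0 + 1) (bl, bi) by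
          simp [pvArgmin, if_neg hg]]
        rcases ih (i0 + 1) bl bi with ⟨heq, hall⟩ | ⟨j, hj, heq, hlt, hall, hfirst⟩
        · left
          refine ⟨heq, ?_⟩
          intro k hk
          cases k with
          | zero => simpa using not_lt.mp hg
          | succ k => simpa using hall k (by simpa using hk)
        · right
          refine ⟨j + 1, by simpa using hj, ?_, ?_, ?_, ?_⟩
          · simpa [Nat.add_assoc, Nat.add_comm 1 j] using heq
          · simpa using hlt
          · intro k hk
            cases k with
            | zero => simp only [List.getElem_cons_succ, List.getElem_cons_zero]; omega
            | succ k => simpa using hall k (by simpa using hk)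
          · intro k hk hkj
            cases k with
            | zero => simp only [List.getElem_cons_succ, List.getElem_cons_zero]; omega
            | succ k => simpa using hfirst k (by simpa using hk) (by omega)

lemma pvArgmin_spec' (g : List Int) (t : List (List Int)) :
    let lg := g :: t
    let r := pvArgmin t 1 ((g.length : Int), 0)
    ∃ hr : r.2 < lg.length,
      r.1 = (lg[r.2].length : Int)
      ∧ (∀ j (hj : j < lg.length), lg[r.2].length ≤ lg[j].length)
      ∧ (∀ j (hj : j < lg.length), j < r.2 → lg[r.2].length < lg[j].length) := by
  intro lg r
  rcases pvArgmin_go t 1 (g.length : Int) 0 with ⟨heq, hall⟩ | ⟨j, hj, heq, hlt, hall, hfirst⟩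
  · have hr2 : r.2 = 0 := by simp [r, heq]
    refine ⟨by simp [hr2, lg], ?_, ?_, ?_⟩
    · simp [r, heq, lg]
    · intro k hk
      cases k with
      | zero => simp [hr2]
      | succ k => simp only [hr2, lg, List.getElem_cons_zero, List.getElem_cons_succ]
                  have := hall k (by simpa [lg] using hk); omega
    · intro k hk hk0; omega
  · have hr2 : r.2 = 1 + j := by simp [r, heq]
    have hr1 : r.1 = (t[j].length : Int) := by simp [r, heq]
    have hlg : lg[r.2]'(by simp [lg, hr2]; omega) = t[j] := by
      simp [lg, hr2, Nat.add_comm 1 j]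
    refine ⟨by simp [lg, hr2]; omega, ?_, ?_, ?_⟩
    · rw [hlg, hr1]
    · intro k hk
      rw [hlg]
      cases k with
      | zero => simp only [lg, List.getElem_cons_zero]; omega
      | succ k => simp only [lg, List.getElem_cons_succ]
                  have := hall k (by simpa [lg] using hk); omega
    · intro k hk hkr
      rw [hlg]
      cases k with
      | zero => simp only [lg, List.getElem_cons_zero]; omega
      | succ k => simp only [lg, List.getElem_cons_succ]
                  have := hfirst k (by simpa [lg] using hk) (by omega); omega

lemma pvArgmin_spec (g : List Int) (t : List (List Int)) :
    ∃ hr : (pvArgmin t 1 ((g.length : Int), 0)).2 < (g :: t).length,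
      (pvArgmin t 1 ((g.length : Int), 0)).1 = (((g :: t)[(pvArgmin t 1 ((g.length : Int), 0)).2]).length : Int)
      ∧ (∀ j (hj : j < (g :: t).length), ((g :: t)[(pvArgmin t 1 ((g.length : Int), 0)).2]'(by omega)).length ≤ (g :: t)[j].length)
      ∧ (∀ j (hj : j < (g :: t).length), j < (pvArgmin t 1 ((g.length : Int), 0)).2 → ((g :: t)[(pvArgmin t 1 ((g.length : Int), 0)).2]'(by omega)).length < (g :: t)[j].length) := by
  simpa using pvArgmin_spec' g t

lemma pvKL_length (lg : List (List Int)) : (pvKL lg).length = lg.length := by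
  simp [pvKL]

lemma pvKL_getElem (lg : List (List Int)) (j : Nat) (hj : j < lg.length) :
    (pvKL lg)[j]'(by simpa [pvKL_length] using hj) = (((lg[j]).length : Int), (j : Int)) := by
  simp [pvKL]

lemma pvKL_set (lg : List (List Int)) (j : Nat) (v : List Int) :
    pvKL (lg.set j v) = (pvKL lg).set j ((v.length : Int), (j : Int)) := by
  apply List.ext_getElem
  · simp [pvKL_length]
  · intro k h1 h2
    have hk1 : k < (lg.set j v).length := by simpa [pvKL_length] using h1
    have hk2 : k < lg.length := by simpa using hk1
    rw [pvKL_getElem (lg.set j v) k hk1]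
    by_cases hkj : k = j
    · subst hkj
      simp
    · rw [List.getElem_set_ne (by omega), List.getElem_set_ne (by omega),
          pvKL_getElem lg k hk2]

lemma pvKL_mem {lg : List (List Int)} {k : Int × Int} (h : k ∈ pvKL lg) :
    ∃ j, ∃ hj : j < lg.length, k = ((lg[j].length : Int), (j : Int)) := by
  rw [List.mem_iff_getElem] at h
  obtain ⟨j, hj, hk⟩ := h
  exact ⟨j, by simpa [pvKL_length] using hj, by rw [← hk, pvKL_getElem]⟩

lemma min_key_unique (lg : List (List Int)) (l i : Int)
    (hmem : (l, i) ∈ pvKL lg)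
    (hmin : ∀ k ∈ pvKL lg, pvLexLe (l, i) k)
    (r2 : Nat) (hr : r2 < lg.length)
    (hminr : ∀ j (hj : j < lg.length), lg[r2].length ≤ lg[j].length)
    (hfirst : ∀ j (hj : j < lg.length), j < r2 → lg[r2].length < lg[j].length) :
    i = (r2 : Int) ∧ l = (lg[r2].length : Int) := by
  obtain ⟨j, hj, hk⟩ := pvKL_mem hmem
  have hlj : l = (lg[j].length : Int) := congrArg Prod.fst hk
  have hij : i = (j : Int) := congrArg Prod.snd hk
  have hmr : pvLexLe (l, i) ((lg[r2].length : Int), (r2 : Int)) := by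
    apply hmin
    rw [List.mem_iff_getElem]
    exact ⟨r2, by simpa [pvKL_length] using hr, by rw [pvKL_getElem lg r2 hr]⟩
  have h1 : lg[r2].length ≤ lg[j].length := hminr j hj
  rcases Nat.lt_trichotomy j r2 with hlt | heq | hgt
  · have := hfirst j hj hlt
    subst hlj hij
    unfold pvLexLe at hmr
    simp at hmr
    omega
  · subst heq; exact ⟨hij, hlj⟩
  · exfalso
    subst hlj hij
    unfold pvLexLe at hmr
    simp at hmr
    omega

lemma build_keys (xs : List (List Int × Nat)) (h0 : PvHeap) :
    (xs.foldl (fun h gi => pvMerge h (.node (gi.1.length : Int) (gi.2 : Int) .nil .nil)) h0).keys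
      = h0.keys + ↑(xs.map fun gi => ((gi.1.length : Int), (gi.2 : Int))) := by
  induction xs generalizing h0 with
  | nil => simp [List.foldl]
  | cons x t ih => simp [List.foldl, ih, pvMerge_keys, PvHeap.keys, add_assoc, Multiset.singleton_add]

lemma build_ordered (xs : List (List Int × Nat)) (h0 : PvHeap) (o : h0.Ordered) :
    (xs.foldl (fun h gi => pvMerge h (.node (gi.1.length : Int) (gi.2 : Int) .nil .nil)) h0).Ordered := by
  induction xs generalizing h0 with
  | nil => exact o
  | cons x t ih =>
      exact ih _ (pvMerge_ordered o (by simp [PvHeap.Ordered, PvHeap.keys]))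

lemma loop_eq (small : List (List Int)) :
    ∀ (lg : List (List Int)) (h : PvHeap), lg ≠ [] → h.Ordered → h.keys = ↑(pvKL lg) →
    small.foldl (fun lg s =>
      match lg with
      | [] => [s]
      | g :: t =>
          let j := (pvArgmin t 1 ((g.length : Int), 0)).2
          lg.set j (lg.getD j [] ++ s)) lg
    = (small.foldl (fun st s =>
        match st.2 with
        | .nil => st
        | .node l i a b =>
            (st.1.set i.toNat (st.1.getD i.toNat [] ++ s),
             pvMerge (pvMerge a b) (.node (l + (s.length : Int)) i .nil .nil)))
      (lg, h)).1 := by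
  induction small with
  | nil => intro lg h _ _ _; rfl
  | cons s rest ih =>
      intro lg h hne ho hkeys
      -- the heap is nonempty
      match h with
      | .nil =>
          exfalso
          match lg, hne with
          | g :: t, _ =>
            have hmem0 : ((g.length : Int), (0 : Int)) ∈ pvKL (g :: t) := by
              have := pvKL_getElem (g :: t) 0 (by simp)
              rw [List.mem_iff_getElem]
              exact ⟨0, by rw [pvKL_length]; simp, by simpa using this⟩
            have : ((g.length : Int), (0 : Int)) ∈ (PvHeap.nil).keys := by
              rw [hkeys]; exact Multiset.mem_coe.mpr hmem0
            simp [PvHeap.keys] at this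
      | .node l i a b =>
          match lg, hne with
          | g :: t, _ =>
            simp only [List.foldl]
            -- identify the popped key with A's argmin
            have ho' : (PvHeap.node l i a b).Ordered := ho
            simp only [PvHeap.Ordered] at ho'
            obtain ⟨hroot, oa, ob⟩ := ho'
            have hmem : (l, i) ∈ pvKL (g :: t) := by
              have hm : (l, i) ∈ (PvHeap.node l i a b).keys := by simp [PvHeap.keys]
              rw [hkeys] at hm
              exact Multiset.mem_coe.mp hm
            have hmin : ∀ k ∈ pvKL (g :: t), pvLexLe (l, i) k := by
              intro k hk
              have hk' : k ∈ (PvHeap.node l i a b).keys := by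
                rw [hkeys]; exact Multiset.mem_coe.mpr hk
              simp only [PvHeap.keys, Multiset.mem_cons] at hk'
              rcases hk' with rfl | hk'
              · unfold pvLexLe; omega
              · exact hroot k hk'
            obtain ⟨hr, hr1, hminr, hfirst⟩ := pvArgmin_spec g t
            set r2 := (pvArgmin t 1 ((g.length : Int), 0)).2 with hr2def
            obtain ⟨hi, hl⟩ := min_key_unique (g :: t) l i hmem hmin r2 hr hminr hfirst
            have hitoNat : i.toNat = r2 := by rw [hi]; exact Int.toNat_natCast r2
            -- the two updated lists coincide
            have hlist : (g :: t).set r2 ((g :: t).getD r2 [] ++ s)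
                = (g :: t).set i.toNat ((g :: t).getD i.toNat [] ++ s) := by rw [hitoNat]
            -- new invariant
            have hgetD : (g :: t).getD r2 [] = (g :: t)[r2] := List.getD_eq_getElem _ _ hr
            set lg' := (g :: t).set r2 ((g :: t).getD r2 [] ++ s) with hlg'def
            have hne' : lg' ≠ [] := by
              intro hcon
              have := congrArg List.length hcon
              simp [hlg'def] at this
            have ho'' : (pvMerge (pvMerge a b) (.node (l + (s.length : Int)) i .nil .nil)).Ordered :=
              pvMerge_ordered (pvMerge_ordered oa ob) (by simp [PvHeap.Ordered, PvHeap.keys])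
            have hkeys' : (pvMerge (pvMerge a b) (.node (l + (s.length : Int)) i .nil .nil)).keys
                = ↑(pvKL lg') := by
              rw [pvMerge_keys, pvMerge_keys]
              have hklget : (pvKL (g :: t))[r2]'(by rw [pvKL_length]; exact hr) = (l, i) := by
                rw [pvKL_getElem (g :: t) r2 hr, hl, hi]
              have hsplit : pvKL (g :: t)
                  = (pvKL (g :: t)).take r2 ++ (l, i) :: (pvKL (g :: t)).drop (r2 + 1) := by
                conv_lhs => rw [← List.take_append_drop r2 (pvKL (g :: t))]
                rw [← List.getElem_cons_drop (show r2 < (pvKL (g :: t)).length by rw [pvKL_length]; exact hr), hklget]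
              have hnewkl : pvKL lg'
                  = (pvKL (g :: t)).take r2 ++ (l + (s.length : Int), i) :: (pvKL (g :: t)).drop (r2 + 1) := by
                rw [hlg'def, pvKL_set, List.set_eq_take_append_cons_drop,
                    if_pos (show r2 < (pvKL (g :: t)).length by rw [pvKL_length]; exact hr)]
                rw [hgetD]
                have hlen : ((((g :: t)[r2]'hr) ++ s).length : Int) = l + (s.length : Int) := by
                  rw [hl]; push_cast [List.length_append]; ring
                rw [hlen, hi]
              rw [hnewkl]
              simp only [PvHeap.keys] at hkeys
              have msplit : (↑(pvKL (g :: t)) : Multiset (Int × Int))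
                  = ↑((pvKL (g :: t)).take r2) + (l, i) ::ₘ ↑((pvKL (g :: t)).drop (r2 + 1)) := by
                conv_lhs => rw [hsplit]
                simp
              have h1 := hkeys.trans msplit
              rw [Multiset.add_cons] at h1
              have hab := (Multiset.cons_inj_right (l, i)).mp h1
              have hsing : (PvHeap.node (l + (s.length : Int)) i .nil .nil).keys
                  = {(l + (s.length : Int), i)} := by simp [PvHeap.keys]
              rw [hsing, hab]
              have hrhs : (↑((pvKL (g :: t)).take r2 ++ (l + (s.length : Int), i) :: (pvKL (g :: t)).drop (r2 + 1)) : Multiset (Int × Int))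
                  = ↑((pvKL (g :: t)).take r2) + (l + (s.length : Int), i) ::ₘ ↑((pvKL (g :: t)).drop (r2 + 1)) := by
                simp
              rw [hrhs, Multiset.add_cons, ← Multiset.singleton_add]
              exact add_comm _ _
            have hrec := ih lg' _ hne' ho'' hkeys'
            rw [hlist] at hrec
            rw [hitoNat] at hrec ⊢
            exact hrec

-- ===== VERDICT (by name: the statement is the Claim_ definition above) =====
theorem balance_small_groups_spec : Claim_equal_balance_small_groups := by
  unfold Claim_equal_balance_small_groups
  intro groups _
  unfold Spec_balance_small_groups balance_small_groups balance_small_groups_alt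
  cases hlarge : groups.filter (fun g => decide (3 ≤ (g.length : Int))) with
  | nil =>
      cases hsmall : groups.filter (fun g => decide ((g.length : Int) < 3)) with
      | nil => simp
      | cons s rest =>
          simp only [List.isEmpty_nil, if_true, List.foldl_cons, List.zipIdx]
          refine loop_eq rest [s] _ (by simp) ?_ ?_
          · simp [pvMerge, pvMergeFuel, PvHeap.size, PvHeap.Ordered, PvHeap.keys]
          · simp [pvMerge, pvMergeFuel, PvHeap.size, PvHeap.keys, pvKL]
  | cons g t =>
      simp only [List.isEmpty_cons, Bool.false_eq_true, if_false]
      refine loop_eq _ (g :: t) _ (by simp) (build_ordered _ _ trivial) ?_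
      rw [build_keys]
      simp [PvHeap.keys, pvKL]
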